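-- pv_equiv track=rewrite | github.com/bunedin81/coding_test | Programmers/체육복.py | solution
-- ===== SOURCE A (Python) =====
-- def solution(n, lost, reserve):
--
--     have = 0
--
--     #우선적으로 본인의 체육복을 처리
--     for i in range(1, n+1):
--         if i in lost:
--             if i in reserve:
--                 reserve.remove(i)
--                 lost.remove(i)
--
--     #그 후 타인의 체육복을 처리
--     for i in range(1, n+1):
--         if i in lost:
--             if (i-1) in reserve:
--                 #해당 학생을 reserve에서 지움
--                 reserve.remove(i-1)
--                 #have추가
--                 have += 1
--             elif (i+1) in reserve:
--                 reserve.remove(i+1)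
--                 have += 1
--         else:
--             have += 1
--
--     return have
-- ===== SOURCE B (Python) =====
-- def solution(n, lost, reserve):
--     # Sliding-window scan: per-student need/spare are computed arithmetically from
--     # two count tables built once (a student both lost and reserved cancels inline);
--     # the scan keeps just three integer locals and mutates no collection
--     # (A removes elements from lost/reserve in place; B leaves them untouched).
--     cl = {}
--     for x in lost:
--         cl[x] = cl.get(x, 0) + 1
--     cr = {}
--     for x in reserve:
--         cr[x] = cr.get(x, 0) + 1
--
--     def spare(j):
--         s = cr.get(j, 0)
--         if 1 <= j <= n and cl.get(j, 0) > 0 and s > 0: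
--             s -= 1
--         return s
--
--     def need(j):
--         c = cl.get(j, 0)
--         if c > 0 and cr.get(j, 0) > 0:
--             c -= 1
--         return c
--
--     have = 0
--     prev_avail = spare(0)
--     cur_avail = spare(1)
--     for i in range(1, n + 1):
--         next_avail = spare(i + 1)
--         if need(i) == 0:
--             have += 1
--         elif prev_avail > 0:
--             prev_avail -= 1
--             have += 1
--         elif next_avail > 0:
--             next_avail -= 1
--             have += 1
--         prev_avail, cur_avail = cur_avail, next_avail
--     return have
-- ===== Notes on version B (the rewrite author's own statement) =====
-- stated objective: faster
-- what changed: A mutates the lost/reserve lists in place across two staged passes with membership scans and .remove; B never mutates a collection: it builds two count tables once, computes each student's need/spare arithmetically (self-cancellation becomes arithmetic instead of A's first pass), and decides lending in a single sliding-window scan that carries just three integer locals.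
import Mathlib
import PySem

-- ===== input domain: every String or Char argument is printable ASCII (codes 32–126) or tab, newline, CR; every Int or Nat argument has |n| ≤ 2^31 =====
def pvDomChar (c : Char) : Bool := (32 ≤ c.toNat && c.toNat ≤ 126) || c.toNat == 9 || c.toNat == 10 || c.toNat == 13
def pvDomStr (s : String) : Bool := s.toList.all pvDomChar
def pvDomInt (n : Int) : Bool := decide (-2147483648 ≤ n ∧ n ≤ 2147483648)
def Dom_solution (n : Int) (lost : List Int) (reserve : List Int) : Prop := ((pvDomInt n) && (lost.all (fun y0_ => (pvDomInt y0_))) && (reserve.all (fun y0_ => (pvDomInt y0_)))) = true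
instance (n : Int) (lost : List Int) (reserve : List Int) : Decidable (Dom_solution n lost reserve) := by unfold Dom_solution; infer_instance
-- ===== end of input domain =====

-- B computes need/spare per student from count tables and lends in one sliding-window scan
-- (return value only: A mutates lost/reserve in place, B does not).

-- ===== PORT A =====
-- pass 1: 'if i in lost: if i in reserve: reserve.remove(i); lost.remove(i)'
-- (remove? is guarded by the membership tests, so the .getD fallback is never taken)
def solutionStep1 (s : List Int × List Int) (i : Int) : List Int × List Int :=
  if i ∈ s.1 then
    if i ∈ s.2 then
      ((PySem.List.remove? s.1 i).getD s.1, (PySem.List.remove? s.2 i).getD s.2)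
    else s
  else s

-- pass 2: state (reserve, have), lost is fixed after pass 1
def solutionStep2 (lost' : List Int) (s : List Int × Int) (i : Int) : List Int × Int :=
  if i ∈ lost' then
    if (i - 1) ∈ s.1 then ((PySem.List.remove? s.1 (i - 1)).getD s.1, s.2 + 1)
    else if (i + 1) ∈ s.1 then ((PySem.List.remove? s.1 (i + 1)).getD s.1, s.2 + 1)
    else s
  else (s.1, s.2 + 1)

def solution (n : Int) (lost : List Int) (reserve : List Int) : Int :=
  let s1 := (PySem.List.pyRange 1 (n + 1) 1).foldl solutionStep1 (lost, reserve)
  let s2 := (PySem.List.pyRange 1 (n + 1) 1).foldl (solutionStep2 s1.1) (s1.2, 0)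
  s2.2

-- ===== PORT B =====
-- spare(j): reserve count at j, minus one if student j (within 1..n) also lost a uniform
def solutionAltSpare (cl cr : PySem.Dict Int Int) (n j : Int) : Int :=
  let s := cr.getD j 0
  if 1 ≤ j ∧ j ≤ n ∧ 0 < cl.getD j 0 ∧ 0 < s then s - 1 else s

-- need(j): lost count at j, minus one if student j also has a reserve uniform
def solutionAltNeed (cl cr : PySem.Dict Int Int) (j : Int) : Int :=
  let c := cl.getD j 0
  if 0 < c ∧ 0 < cr.getD j 0 then c - 1 else c

-- loop body; state (prev_avail, cur_avail, have); the trailing shift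
-- 'prev_avail, cur_avail = cur_avail, next_avail' is folded into each returned triple
-- (the 'prev_avail -= 1' of the left-borrow branch is dead: the shift overwrites it)
def solutionAltStep (cl cr : PySem.Dict Int Int) (n : Int) (s : Int × Int × Int) (i : Int) :
    Int × Int × Int :=
  let next := solutionAltSpare cl cr n (i + 1)
  if solutionAltNeed cl cr i = 0 then (s.2.1, next, s.2.2 + 1)
  else if 0 < s.1 then (s.2.1, next, s.2.2 + 1)
  else if 0 < next then (s.2.1, next - 1, s.2.2 + 1)
  else (s.2.1, next, s.2.2)

def solution_alt (n : Int) (lost : List Int) (reserve : List Int) : Int :=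
  let cl := lost.foldl (fun d x => d.insert x (d.getD x 0 + 1)) PySem.Dict.empty
  let cr := reserve.foldl (fun d x => d.insert x (d.getD x 0 + 1)) PySem.Dict.empty
  let s := (PySem.List.pyRange 1 (n + 1) 1).foldl (solutionAltStep cl cr n)
    (solutionAltSpare cl cr n 0, solutionAltSpare cl cr n 1, 0)
  s.2.2

-- ===== PRECONDITION & SPEC =====
def Spec_solution (n : Int) (lost : List Int) (reserve : List Int) (out : Int) : Prop := out = solution_alt n lost reserve
instance (n : Int) (lost : List Int) (reserve : List Int) (out : Int) : Decidable (Spec_solution n lost reserve out) := by unfold Spec_solution; infer_instance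

-- ===== CLAIM (what is proved, stated in full; the proofs are below) =====
def Claim_equal_solution : Prop := ∀ (n : Int) (lost : List Int) (reserve : List Int), Dom_solution n lost reserve → Spec_solution n lost reserve (solution n lost reserve)

-- ===== LEMMAS AND PROOFS =====

theorem remove_getD_of_mem {xs : List Int} {i : Int} (hi : i ∈ xs) :
    (PySem.List.remove? xs i).getD xs = xs.erase i := by
  rw [PySem.List.remove?_eq_some_erase xs i hi]; rfl

-- multiplicity after A's pass 1: each index of L cancels at most one lost/reserve pair
theorem pass1_count (L : List Int) : ∀ (lo re : List Int), L.Nodup → ∀ j : Int,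
    ((L.foldl solutionStep1 (lo, re)).1.count j =
      lo.count j - (if j ∈ L ∧ 0 < lo.count j ∧ 0 < re.count j then 1 else 0)) ∧
    ((L.foldl solutionStep1 (lo, re)).2.count j =
      re.count j - (if j ∈ L ∧ 0 < lo.count j ∧ 0 < re.count j then 1 else 0)) := by
  induction L with
  | nil => intro lo re _ j; simp
  | cons i L ih =>
    intro lo re hnd j
    have hiL : i ∉ L := (List.nodup_cons.mp hnd).1
    have hndL : L.Nodup := (List.nodup_cons.mp hnd).2
    simp only [List.foldl_cons]
    by_cases hml : i ∈ lo
    · by_cases hmr : i ∈ re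
      · rw [solutionStep1, if_pos hml, if_pos hmr]
        simp only [remove_getD_of_mem hml, remove_getD_of_mem hmr]
        obtain ⟨h1, h2⟩ := ih (lo.erase i) (re.erase i) hndL j
        have hploi : 0 < lo.count i := List.count_pos_iff.mpr hml
        have hprei : 0 < re.count i := List.count_pos_iff.mpr hmr
        by_cases hk : j = i
        · subst hk
          refine ⟨?_, ?_⟩
          · rw [h1, List.count_erase_self,
                if_neg (fun hc => hiL hc.1), if_pos ⟨List.mem_cons_self, hploi, hprei⟩]
            omega
          · rw [h2, List.count_erase_self,
                if_neg (fun hc => hiL hc.1), if_pos ⟨List.mem_cons_self, hploi, hprei⟩]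
            omega
        · have hklo : (lo.erase i).count j = lo.count j := List.count_erase_of_ne hk
          have hkre : (re.erase i).count j = re.count j := List.count_erase_of_ne hk
          refine ⟨?_, ?_⟩
          · rw [h1, hklo, hkre]
            simp only [List.mem_cons, hk, false_or]
          · rw [h2, hklo, hkre]
            simp only [List.mem_cons, hk, false_or]
      · rw [solutionStep1, if_pos hml, if_neg hmr]
        obtain ⟨h1, h2⟩ := ih lo re hndL j
        have hrei : re.count i = 0 := List.count_eq_zero.mpr hmr
        by_cases hk : j = i
        · subst hk
          refine ⟨?_, ?_⟩
          · rw [h1, if_neg (fun hc => hiL hc.1), if_neg (fun hc => by omega)]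
          · rw [h2, if_neg (fun hc => hiL hc.1), if_neg (fun hc => by omega)]
        · refine ⟨?_, ?_⟩
          · rw [h1]
            simp only [List.mem_cons, hk, false_or]
          · rw [h2]
            simp only [List.mem_cons, hk, false_or]
    · rw [solutionStep1, if_neg hml]
      obtain ⟨h1, h2⟩ := ih lo re hndL j
      have hloi : lo.count i = 0 := List.count_eq_zero.mpr hml
      by_cases hk : j = i
      · subst hk
        refine ⟨?_, ?_⟩
        · rw [h1, if_neg (fun hc => hiL hc.1), if_neg (fun hc => by omega)]
        · rw [h2, if_neg (fun hc => hiL hc.1), if_neg (fun hc => by omega)]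
      · refine ⟨?_, ?_⟩
        · rw [h1]
          simp only [List.mem_cons, hk, false_or]
        · rw [h2]
          simp only [List.mem_cons, hk, false_or]

-- the scan simulation: A's pass 2 over the live reserve list versus B's three-local window
theorem scan_sim (n : Int) (cl cr : PySem.Dict Int Int) (lost1 : List Int)
    (hneed : ∀ j : Int, 1 ≤ j → j ≤ n → (j ∈ lost1 ↔ ¬ solutionAltNeed cl cr j = 0))
    (L : List Int) :
    ∀ (i : Int) (reA : List Int) (h prev cur : Int),
    L = PySem.List.pyRange i (n + 1) 1 → 1 ≤ i →
    (reA.count (i - 1) : Int) = prev →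
    (reA.count i : Int) = cur →
    (∀ j : Int, i + 1 ≤ j → (reA.count j : Int) = solutionAltSpare cl cr n j) →
    (L.foldl (solutionStep2 lost1) (reA, h)).2 =
      (L.foldl (solutionAltStep cl cr n) (prev, cur, h)).2.2 := by
  induction L with
  | nil => intro i reA h prev cur _ _ _ _ _; rfl
  | cons x L ih =>
    intro i reA h prev cur hL hi hprev hcur hsp
    have hin : i < n + 1 := by
      by_contra hge
      rw [PySem.List.pyRange_one_eq_nil (by omega)] at hL
      simp at hL
    rw [PySem.List.pyRange_one_cons hin] at hL
    injection hL with hx hLr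
    subst hLr
    rw [hx]
    have hnexteq : (reA.count (i + 1) : Int) = solutionAltSpare cl cr n (i + 1) :=
      hsp (i + 1) le_rfl
    simp only [List.foldl_cons]
    by_cases hml : i ∈ lost1
    · have hne : ¬ solutionAltNeed cl cr i = 0 := (hneed i hi (by omega)).mp hml
      rw [solutionStep2, if_pos hml]
      by_cases h1 : (i - 1) ∈ reA
      · -- borrow from the left
        have hprevpos : 0 < prev := by
          have := List.count_pos_iff.mpr h1
          omega
        have hstepB : solutionAltStep cl cr n (prev, cur, h) i =
            (cur, solutionAltSpare cl cr n (i + 1), h + 1) := by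
          simp only [solutionAltStep]
          rw [if_neg hne, if_pos hprevpos]
        rw [if_pos h1, remove_getD_of_mem h1, hstepB]
        refine ih (i + 1) _ (h + 1) cur (solutionAltSpare cl cr n (i + 1)) rfl (by omega) ?_ ?_ ?_
        · rw [show i + 1 - 1 = i by ring, List.count_erase_of_ne (by omega : i ≠ i - 1)]
          exact hcur
        · rw [List.count_erase_of_ne (by omega : i + 1 ≠ i - 1)]
          exact hnexteq
        · intro j hj
          rw [List.count_erase_of_ne (by omega : j ≠ i - 1)]
          exact hsp j (by omega)
      · have hprev0 : ¬ 0 < prev := by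
          have : reA.count (i - 1) = 0 := List.count_eq_zero.mpr h1
          omega
        rw [if_neg h1]
        by_cases h2 : (i + 1) ∈ reA
        · -- borrow from the right
          have hcnt1 : 0 < reA.count (i + 1) := List.count_pos_iff.mpr h2
          have hnextpos : 0 < solutionAltSpare cl cr n (i + 1) := by omega
          have hstepB : solutionAltStep cl cr n (prev, cur, h) i =
              (cur, solutionAltSpare cl cr n (i + 1) - 1, h + 1) := by
            simp only [solutionAltStep]
            rw [if_neg hne, if_neg hprev0, if_pos hnextpos]
          rw [if_pos h2, remove_getD_of_mem h2, hstepB]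
          refine ih (i + 1) _ (h + 1) cur (solutionAltSpare cl cr n (i + 1) - 1) rfl (by omega) ?_ ?_ ?_
          · rw [show i + 1 - 1 = i by ring, List.count_erase_of_ne (by omega : i ≠ i + 1)]
            exact hcur
          · rw [List.count_erase_self]
            omega
          · intro j hj
            rw [List.count_erase_of_ne (by omega : j ≠ i + 1)]
            exact hsp j (by omega)
        · -- nobody can lend
          have hcnt1 : reA.count (i + 1) = 0 := List.count_eq_zero.mpr h2
          have hnext0 : ¬ 0 < solutionAltSpare cl cr n (i + 1) := by omega
          have hstepB : solutionAltStep cl cr n (prev, cur, h) i =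
              (cur, solutionAltSpare cl cr n (i + 1), h) := by
            simp only [solutionAltStep]
            rw [if_neg hne, if_neg hprev0, if_neg hnext0]
          rw [if_neg h2, hstepB]
          refine ih (i + 1) reA h cur (solutionAltSpare cl cr n (i + 1)) rfl (by omega) ?_ hnexteq ?_
          · rw [show i + 1 - 1 = i by ring]
            exact hcur
          · intro j hj
            exact hsp j (by omega)
    · -- student i has a uniform
      have hne : solutionAltNeed cl cr i = 0 := by
        by_contra hc
        exact hml ((hneed i hi (by omega)).mpr hc)
      have hstepB : solutionAltStep cl cr n (prev, cur, h) i =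
          (cur, solutionAltSpare cl cr n (i + 1), h + 1) := by
        simp only [solutionAltStep]
        rw [if_pos hne]
      rw [solutionStep2, if_neg hml, hstepB]
      refine ih (i + 1) reA (h + 1) cur (solutionAltSpare cl cr n (i + 1)) rfl (by omega) ?_ hnexteq ?_
      · rw [show i + 1 - 1 = i by ring]
        exact hcur
      · intro j hj
        exact hsp j (by omega)

-- ===== VERDICT (by name: the statement is the Claim_ definition above) =====
theorem solution_spec : Claim_equal_solution := by
  intro n lost reserve _
  unfold Spec_solution solution solution_alt
  set cl := lost.foldl (fun d x => d.insert x (d.getD x 0 + 1)) (PySem.Dict.empty : PySem.Dict Int Int) with hcldef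
  set cr := reserve.foldl (fun d x => d.insert x (d.getD x 0 + 1)) (PySem.Dict.empty : PySem.Dict Int Int) with hcrdef
  have hcl : ∀ j : Int, cl.getD j 0 = (lost.count j : Int) := by
    intro j
    rw [hcldef, PySem.Dict.getD_foldl_insert_add_one]
    simp [PySem.Dict.getD_empty]
  have hcr : ∀ j : Int, cr.getD j 0 = (reserve.count j : Int) := by
    intro j
    rw [hcrdef, PySem.Dict.getD_foldl_insert_add_one]
    simp [PySem.Dict.getD_empty]
  set s1 := (PySem.List.pyRange 1 (n + 1) 1).foldl solutionStep1 (lost, reserve) with hs1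
  have hp1 := pass1_count (PySem.List.pyRange 1 (n + 1) 1) lost reserve
    (PySem.List.nodup_pyRange_one 1 (n + 1))
  have hspare : ∀ j : Int, (s1.2.count j : Int) = solutionAltSpare cl cr n j := by
    intro j
    have h2 := (hp1 j).2
    simp only [PySem.List.mem_pyRange_one] at h2
    rw [h2]
    simp only [solutionAltSpare, hcl, hcr]
    split_ifs <;> omega
  have hneed : ∀ j : Int, 1 ≤ j → j ≤ n → (j ∈ s1.1 ↔ ¬ solutionAltNeed cl cr j = 0) := by
    intro j hj1 hj2
    have h1 := (hp1 j).1
    simp only [PySem.List.mem_pyRange_one] at h1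
    have hmem : (j ∈ s1.1) ↔ 0 < (s1.1.count j : Int) := by
      rw [Int.natCast_pos, List.count_pos_iff]
    rw [hmem, h1]
    simp only [solutionAltNeed, hcl, hcr]
    split_ifs <;> omega
  exact scan_sim n cl cr s1.1 hneed (PySem.List.pyRange 1 (n + 1) 1) 1 s1.2 0
    (solutionAltSpare cl cr n 0) (solutionAltSpare cl cr n 1) rfl le_rfl
    (by rw [show (1 : Int) - 1 = 0 by norm_num]; exact hspare 0) (hspare 1)
    (fun j _ => hspare j)
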